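-- pv_equiv track=rewrite | github.com/jgrprior/csp | init_db.py | pop_users
-- ===== SOURCE A (Python) =====
-- def pop_users(ids, n):
--     invitees = []
--     for _ in range(n):
--         try:
--             invitees.append(ids.pop())
--         except IndexError:
--             break
--
--     return invitees
-- ===== SOURCE B (Python) =====
-- def pop_users(ids, n):
--     k = min(n, len(ids))
--     if k < 0:
--         k = 0
--     cut = len(ids) - k
--     invitees = ids[cut:][::-1]
--     del ids[cut:]
--     return invitees
-- ===== Notes on version B (the rewrite author's own statement) =====
-- stated objective: simpler
-- what changed: Replaces A's per-element pop-and-append loop (with exception-driven break) by computing the pop count k = max(0, min(n, len(ids))) and taking/deleting the last k elements in one slice, reversed.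
import Mathlib
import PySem

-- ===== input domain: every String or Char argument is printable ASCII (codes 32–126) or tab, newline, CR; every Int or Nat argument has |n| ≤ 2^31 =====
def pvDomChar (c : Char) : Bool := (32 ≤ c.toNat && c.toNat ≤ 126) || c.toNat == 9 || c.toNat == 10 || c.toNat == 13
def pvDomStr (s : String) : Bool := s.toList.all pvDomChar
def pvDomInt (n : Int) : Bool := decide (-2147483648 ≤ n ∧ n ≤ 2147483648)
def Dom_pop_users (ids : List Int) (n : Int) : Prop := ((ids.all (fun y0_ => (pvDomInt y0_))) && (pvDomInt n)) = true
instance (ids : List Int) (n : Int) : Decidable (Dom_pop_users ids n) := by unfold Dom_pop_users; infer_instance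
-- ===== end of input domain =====

-- B replaces A's per-element pop loop by one count-and-slice bulk operation (simpler);
-- both Pythons mutate `ids` identically, the theorems here are about the RETURN value.

-- ===== PORT A =====
-- the `for _ in range(n): try: invitees.append(ids.pop()) except IndexError: break` loop;
-- fuel = iterations remaining, `none` from pop? is the IndexError → break
def pop_users_go (fuel : Nat) (ids acc : List Int) : List Int :=
  match fuel with
  | 0 => acc
  | f + 1 =>
    match PySem.List.pop? ids with   -- ids.pop() pops the last element
    | none => acc
    | some (x, rest) => pop_users_go f rest (acc ++ [x])

def pop_users (ids : List Int) (n : Int) : List Int :=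
  pop_users_go n.toNat ids []

-- ===== PORT B =====
def pop_users_alt (ids : List Int) (n : Int) : List Int :=
  let k := if min n (ids.length : Int) < 0 then 0 else min n (ids.length : Int)
  let cut := (ids.length : Int) - k
  (PySem.List.slice ids (some cut) none).reverse

-- ===== PRECONDITION & SPEC =====
def Spec_pop_users (ids : List Int) (n : Int) (out : List Int) : Prop := out = pop_users_alt ids n
instance (ids : List Int) (n : Int) (out : List Int) : Decidable (Spec_pop_users ids n out) := by unfold Spec_pop_users; infer_instance

-- ===== CLAIM (what is proved, stated in full; the proofs are below) =====
def Claim_equal_pop_users : Prop := ∀ (ids : List Int) (n : Int), Dom_pop_users ids n → Spec_pop_users ids n (pop_users ids n)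

-- ===== LEMMAS AND PROOFS =====

theorem pop_users_go_eq (fuel : Nat) :
    ∀ (ids acc : List Int),
      pop_users_go fuel ids acc
        = acc ++ (ids.drop (ids.length - min fuel ids.length)).reverse := by
  induction fuel with
  | zero => intro ids acc; simp [pop_users_go]
  | succ f ih =>
    intro ids acc
    rcases List.eq_nil_or_concat ids with h | ⟨ys, x, h⟩
    · subst h; simp [pop_users_go, PySem.List.pop?]
    · subst h
      simp only [List.concat_eq_append]
      have hpop : PySem.List.pop? (ys ++ [x]) = some (x, ys) := PySem.List.pop?_last ys x
      have hle : ys.length - min f ys.length ≤ ys.length := Nat.sub_le _ _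
      rw [pop_users_go, hpop]
      show pop_users_go f ys (acc ++ [x]) = _
      rw [ih]
      have hmin : (ys ++ [x]).length - min (f + 1) (ys ++ [x]).length
          = ys.length - min f ys.length := by
        simp only [List.length_append, List.length_cons, List.length_nil]; omega
      rw [hmin, List.drop_append_of_le_length hle]
      simp

theorem pop_users_spec_aux (ids : List Int) (n : Int) :
    pop_users ids n = pop_users_alt ids n := by
  unfold pop_users pop_users_alt
  have hk : (0 : Int) ≤ (ids.length : Int) -
      (if min n (ids.length : Int) < 0 then 0 else min n (ids.length : Int)) := by omega
  show pop_users_go n.toNat ids []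
      = (PySem.List.slice ids (some ((ids.length : Int) -
          (if min n (ids.length : Int) < 0 then 0 else min n (ids.length : Int))))).reverse
  rw [pop_users_go_eq, PySem.List.slice_from ids hk]
  have : ((ids.length : Int) -
      (if min n (ids.length : Int) < 0 then 0 else min n (ids.length : Int))).toNat
      = ids.length - min n.toNat ids.length := by omega
  rw [this]
  simp

-- ===== VERDICT (by name: the statement is the Claim_ definition above) =====
theorem pop_users_spec : Claim_equal_pop_users := by
  intro ids n _
  exact pop_users_spec_aux ids n
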